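-- pv_equiv track=rewrite | github.com/morisan/aoc-2017-py | 10a.py | solve
-- ===== SOURCE A (Python) =====
-- from collections import deque
--
-- def solve(input):
--   num_list = deque(range(0,256))
--   num_list_len = len(num_list)
--
--   i = 0
--   skip_size = 0
--   lengths = input.split(',')
--   for l in lengths:
--     l = int(l)
--     span = deque([])
--
--     num_list.rotate(-1*i)
--
--     for j in range(0, l):
--       span.append(num_list.popleft())
--
--     while len(span) > 0:
--       num_list.appendleft(span.popleft())
--
--     num_list.rotate(i)
--
--     i = (i + l + skip_size) % len(num_list)
--     skip_size += 1
--
--   return num_list[0] * num_list[1]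
-- ===== SOURCE B (Python) =====
-- def solve(input):
--   # Flat list kept in a rotated frame (current position is always index 0),
--   # plus an offset tracking the total rotation; one slice-rotation per round
--   # replaces the deque's rotate/pop/appendleft/rotate dance.
--   nums = list(range(256))
--   off = 0
--   skip = 0
--   for t in input.split(','):
--     l = int(t)
--     for k in range(l // 2):
--       nums[k], nums[l - 1 - k] = nums[l - 1 - k], nums[k]
--     r = (l + skip) % 256
--     nums = nums[r:] + nums[:r]
--     off = (off + r) % 256
--     skip += 1
--   return nums[(0 - off) % 256] * nums[(1 - off) % 256]
-- ===== Notes on version B (the rewrite author's own statement) =====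
-- stated objective: alternative
-- what changed: Replaces the deque's per-round rotate/popleft-loop/appendleft-loop/rotate-back with a flat list kept in a rotated frame: an in-place prefix swap reverses the window, one slice rotation advances the frame, and an offset is tracked so the first two elements are read back with modular indices at the end.
import Mathlib
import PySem

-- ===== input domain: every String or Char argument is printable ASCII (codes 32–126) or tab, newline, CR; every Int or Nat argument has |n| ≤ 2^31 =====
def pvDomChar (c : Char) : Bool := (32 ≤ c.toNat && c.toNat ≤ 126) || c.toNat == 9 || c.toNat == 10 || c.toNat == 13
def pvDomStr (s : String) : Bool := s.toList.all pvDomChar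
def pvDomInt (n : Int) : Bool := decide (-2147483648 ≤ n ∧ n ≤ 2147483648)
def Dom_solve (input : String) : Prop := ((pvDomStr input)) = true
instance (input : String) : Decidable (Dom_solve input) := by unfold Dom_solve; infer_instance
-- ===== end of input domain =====

-- B replaces A's deque (rotate / popleft / appendleft / rotate-back per round) by a flat list kept in a
-- rotated frame with an offset (alternative data structure; equivalence on Pre_ is proved below).

-- ===== PORT A =====

-- deque.rotate(-i) for 0 ≤ i < len (i is always reduced mod 256 in A)
def rotNeg (xs : List Int) (i : Nat) : List Int := xs.drop i ++ xs.take i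
-- deque.rotate(i) for 0 ≤ i < len
def rotPos (xs : List Int) (i : Nat) : List Int :=
  xs.drop (xs.length - i) ++ xs.take (xs.length - i)

-- 'for j in range(0, l): span.append(num_list.popleft())' — none = IndexError (popleft on empty)
def popN : Nat → List Int → Option (List Int × List Int)
  | 0, xs => some ([], xs)
  | _ + 1, [] => none
  | n + 1, x :: xs => (popN n xs).map (fun p => (x :: p.1, p.2))

-- 'while len(span) > 0: num_list.appendleft(span.popleft())'
def pushFront : List Int → List Int → List Int
  | [], nl => nl
  | s :: sp, nl => pushFront sp (s :: nl)

-- one iteration of A's 'for l in lengths' loop; none propagates an int()/IndexError failure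
def stepA (st : Option (List Int × Int × Int)) (t : String) : Option (List Int × Int × Int) :=
  st.bind fun s =>
    (PySem.Int.ofStr? t).bind fun l =>
      let nl1 := rotNeg s.1 s.2.1.toNat
      (popN l.toNat nl1).map fun p =>
        let nl2 := pushFront p.1 p.2
        let nl3 := rotPos nl2 s.2.1.toNat
        (nl3, PySem.Int.mod (s.2.1 + l + s.2.2) (PySem.List.len nl3), s.2.2 + 1)

def solve (input : String) : Int :=
  match ((PySem.Str.split? input ",").getD []).foldl stepA
      (some (PySem.List.pyRange 0 256 1, 0, 0)) with
  | some s => (PySem.List.pyGet? s.1 0).getD 0 * (PySem.List.pyGet? s.1 1).getD 0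
  | none => 0

-- ===== PORT B =====

-- 'nums[k], nums[l-1-k] = nums[l-1-k], nums[k]'
def swapStep (l : Int) (nums : List Int) (k : Int) : List Int :=
  let a := (PySem.List.pyGet? nums k).getD 0
  let b := (PySem.List.pyGet? nums (l - 1 - k)).getD 0
  PySem.List.pySetD (PySem.List.pySetD nums k b) (l - 1 - k) a

-- one iteration of B's loop: reverse prefix in the local frame, then rotate once
def stepB (st : Option (List Int × Int × Int)) (t : String) : Option (List Int × Int × Int) :=
  st.bind fun s =>
    (PySem.Int.ofStr? t).map fun l =>
      let nums1 := (PySem.List.pyRange 0 (PySem.Int.floordiv l 2) 1).foldl (swapStep l) s.1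
      let r := PySem.Int.mod (l + s.2.2) 256
      let nums2 := PySem.List.slice nums1 (some r) none ++ PySem.List.slice nums1 none (some r)
      (nums2, PySem.Int.mod (s.2.1 + r) 256, s.2.2 + 1)

def solve_alt (input : String) : Int :=
  match ((PySem.Str.split? input ",").getD []).foldl stepB
      (some (PySem.List.pyRange 0 256 1, 0, 0)) with
  | some s =>
      (PySem.List.pyGet? s.1 (PySem.Int.mod (0 - s.2.1) 256)).getD 0 *
      (PySem.List.pyGet? s.1 (PySem.Int.mod (1 - s.2.1) 256)).getD 0
  | none => 0

-- ===== PRECONDITION & SPEC =====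
-- Pre_ excludes exactly the inputs where A raises: tokens that int() rejects (ValueError) and
-- lengths above 256 (popleft on an emptied deque raises IndexError). Nothing A returns on is excluded.
def Pre_solve (input : String) : Prop :=
  ∀ t ∈ (PySem.Str.split? input ",").getD [],
    ((PySem.Int.ofStr? t).map (fun v => decide (v ≤ 256))).getD false = true
instance (input : String) : Decidable (Pre_solve input) := by unfold Pre_solve; infer_instance
def pvWitness_solve : String := "3,4,1,5"

def Spec_solve (input : String) (out : Int) : Prop := out = solve_alt input
instance (input : String) (out : Int) : Decidable (Spec_solve input out) := by unfold Spec_solve; infer_instance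

-- ===== CLAIM (what is proved, stated in full; the proofs are below) =====
def Claim_equal_solve : Prop := ∀ (input : String), Dom_solve input → Pre_solve input → Spec_solve input (solve input)

-- ===== LEMMAS AND PROOFS =====

lemma popN_eq (n : Nat) (xs : List Int) (h : n ≤ xs.length) :
    popN n xs = some (xs.take n, xs.drop n) := by
  induction n generalizing xs with
  | zero => simp [popN]
  | succ n ih =>
    cases xs with
    | nil => simp at h
    | cons x xs => simp [popN, ih xs (by simpa using h)]

lemma pushFront_eq (s r : List Int) : pushFront s r = s.reverse ++ r := by
  induction s generalizing r with
  | nil => simp [pushFront]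
  | cons a s ih => simp [pushFront, ih]

lemma length_foldl_swapStep (l : Int) (ks : List Int) (xs : List Int) :
    (ks.foldl (swapStep l) xs).length = xs.length := by
  induction ks generalizing xs with
  | nil => rfl
  | cons k ks ih => simp [ih, swapStep, PySem.List.length_pySetD]

lemma swapFold_getElem? (xs : List Int) (n : Nat) (hn : n ≤ xs.length)
    (m : Nat) (hm : m ≤ n / 2) (j : Nat) :
    (((List.range m).map (Nat.cast : Nat → Int)).foldl (swapStep (n : Int)) xs)[j]? =
      if j < m ∨ (n - m ≤ j ∧ j < n) then xs[n - 1 - j]? else xs[j]? := by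
  induction m generalizing j with
  | zero =>
    simp only [List.range_zero, List.map_nil, List.foldl_nil]
    rw [if_neg (by omega : ¬ (j < 0 ∨ (n - 0 ≤ j ∧ j < n)))]
  | succ m ih =>
    have hm' : m ≤ n / 2 := by omega
    rw [List.range_succ, List.map_append, List.foldl_append]
    simp only [List.map_cons, List.map_nil, List.foldl_cons, List.foldl_nil]
    set prev := ((List.range m).map (Nat.cast : Nat → Int)).foldl (swapStep (n : Int)) xs with hprev
    have hlp : prev.length = xs.length := length_foldl_swapStep _ _ _
    have hmn : m < n ∧ m < n - 1 - m ∧ n - 1 - m < n := by omega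
    have hpm : prev[m]? = xs[m]? := by
      rw [ih hm' m, if_neg (by omega : ¬ (m < m ∨ (n - m ≤ m ∧ m < n)))]
    have hpo : prev[n - 1 - m]? = xs[n - 1 - m]? := by
      rw [ih hm' (n - 1 - m), if_neg (by omega : ¬ (n - 1 - m < m ∨ (n - m ≤ n - 1 - m ∧ n - 1 - m < n)))]
    have hxm : xs[m]? = some xs[m] := List.getElem?_eq_getElem (by omega)
    have hxo : xs[n - 1 - m]? = some xs[n - 1 - m] := List.getElem?_eq_getElem (by omega)
    have hcast : (n : Int) - 1 - (m : Int) = ((n - 1 - m : Nat) : Int) := by omega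
    have hstep : swapStep (n : Int) prev (m : Int) =
        (prev.set m xs[n - 1 - m]).set (n - 1 - m) xs[m] := by
      simp only [swapStep, hcast, PySem.List.pyGet?_natCast, PySem.List.pySetD_natCast,
        hpm, hpo, hxm, hxo, Option.getD_some]
    rw [hstep]
    by_cases h1 : j = n - 1 - m
    · subst h1
      rw [List.getElem?_set_self (by simp [hlp]; omega)]
      rw [if_pos (by omega)]
      have : n - 1 - (n - 1 - m) = m := by omega
      rw [this, hxm]
    · rw [List.getElem?_set_ne (by omega)]
      by_cases h2 : j = m
      · subst h2
        rw [List.getElem?_set_self (by simp [hlp]; omega), if_pos (by omega)]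
        exact hxo.symm
      · rw [List.getElem?_set_ne (by omega), ih hm' j]
        by_cases hc : j < m ∨ (n - m ≤ j ∧ j < n)
        · rw [if_pos hc, if_pos (by omega)]
        · rw [if_neg hc, if_neg (by omega)]

lemma pyRange_zero_cast (b : Nat) :
    PySem.List.pyRange 0 (b : Int) 1 = (List.range b).map (Nat.cast : Nat → Int) := by
  rw [PySem.List.pyRange_one]
  simp

lemma swapFold_eq (l : Int) (xs : List Int) (h : l.toNat ≤ xs.length) :
    (PySem.List.pyRange 0 (PySem.Int.floordiv l 2) 1).foldl (swapStep l) xs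
      = (xs.take l.toNat).reverse ++ xs.drop l.toNat := by
  rcases (by omega : l ≤ 0 ∨ 0 < l) with hl | hl
  · have h2 : PySem.Int.floordiv l 2 < 1 := by
      rw [PySem.Int.floordiv_lt_iff_lt_mul (by omega)]; omega
    rw [PySem.List.pyRange_one_eq_nil (by omega)]
    have : l.toNat = 0 := by omega
    simp [this]
  · have hln : l = ((l.toNat : Nat) : Int) := by omega
    have hfd : PySem.Int.floordiv l 2 = ((l.toNat / 2 : Nat) : Int) := by
      rw [hln]; exact_mod_cast PySem.Int.floordiv_natCast l.toNat 2
    rw [hfd, pyRange_zero_cast]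
    set n := l.toNat with hn
    have hfold : ∀ (ks : List Int) (xs' : List Int), ks.foldl (swapStep l) xs' = ks.foldl (swapStep (n : Int)) xs' := by
      intro ks xs'; rw [← hln]
    rw [hfold]
    apply List.ext_getElem?
    intro j
    rw [swapFold_getElem? xs n h (n / 2) le_rfl j]
    by_cases hj : j < n
    · rw [List.getElem?_append_left (by simp; omega)]
      have hjr : ((xs.take n).reverse)[j]? = (xs.take n)[n - 1 - j]? := by
        rw [List.getElem?_reverse (by simp; omega)]
        congr 1
        simp; omega
      rw [hjr, List.getElem?_take_of_lt (by omega)]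
      by_cases hc : j < n / 2 ∨ (n - n / 2 ≤ j ∧ j < n)
      · rw [if_pos hc]
      · rw [if_neg hc]
        have : n - 1 - j = j := by omega
        rw [this]
    · rw [List.getElem?_append_right (by simp; omega)]
      rw [if_neg (by omega), List.getElem?_drop]
      congr 1
      simp; omega

-- one round: A's deque round and B's local-frame round stay in the rotation relation
lemma step_eq (t : String) (nl : List Int) (i sk l : Int)
    (hlen : nl.length = 256) (hi0 : 0 ≤ i) (hi : i < 256)
    (hparse : PySem.Int.ofStr? t = some l) (hl : l ≤ 256) :
    ∃ nl' i',
      stepA (some (nl, i, sk)) t = some (nl', i', sk + 1) ∧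
      stepB (some (nl.rotate i.toNat, i, sk)) t = some (nl'.rotate i'.toNat, i', sk + 1) ∧
      nl'.length = 256 ∧ 0 ≤ i' ∧ i' < 256 := by
  have hl0 : l.toNat ≤ 256 := by omega
  have hnl1 : rotNeg nl i.toNat = nl.rotate i.toNat := by
    rw [rotNeg, List.rotate_eq_drop_append_take (by omega)]
  set nums := nl.rotate i.toNat with hnums
  have hlenN : nums.length = 256 := by simp [hnums, hlen]
  have hpop : popN l.toNat (rotNeg nl i.toNat) = some (nums.take l.toNat, nums.drop l.toNat) := by
    rw [hnl1]; exact popN_eq _ _ (by omega)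
  set nl2 := (nums.take l.toNat).reverse ++ nums.drop l.toNat with hnl2
  have hlen2 : nl2.length = 256 := by simp [hnl2]; omega
  have hrotP : rotPos nl2 i.toNat = nl2.rotate (256 - i.toNat) := by
    rw [rotPos, hlen2, List.rotate_eq_drop_append_take (by omega)]
  set i' := PySem.Int.mod (i + l + sk) 256 with hi'
  have hi'0 : 0 ≤ i' := PySem.Int.mod_nonneg _ (by norm_num)
  have hi'lt : i' < 256 := PySem.Int.mod_lt _ (by norm_num)
  refine ⟨nl2.rotate (256 - i.toNat), i', ?_, ?_, by simp [hlen2], hi'0, hi'lt⟩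
  · -- A's round
    simp only [stepA, Option.bind_some, hparse, hpop, Option.map_some, pushFront_eq]
    rw [← hnl2, hrotP]
    have hlen3 : PySem.List.len (nl2.rotate (256 - i.toNat)) = 256 := by
      rw [PySem.List.len_eq]; simp [hlen2]
    rw [hlen3]
  · -- B's round
    set r := PySem.Int.mod (l + sk) 256 with hr
    have hr0 : 0 ≤ r := PySem.Int.mod_nonneg _ (by norm_num)
    have hrlt : r < 256 := PySem.Int.mod_lt _ (by norm_num)
    have hswap : (PySem.List.pyRange 0 (PySem.Int.floordiv l 2) 1).foldl (swapStep l) nums = nl2 :=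
      swapFold_eq l nums (by omega)
    have hs1 : PySem.List.slice nl2 (some r) none = nl2.drop r.toNat := PySem.List.slice_from _ hr0
    have hs2 : PySem.List.slice nl2 none (some r) = nl2.take r.toNat := PySem.List.slice_to _ hr0
    have hrot2 : nl2.drop r.toNat ++ nl2.take r.toNat = nl2.rotate r.toNat :=
      (List.rotate_eq_drop_append_take (by omega)).symm
    have emod1 : i' = (i + l + sk) % 256 := by
      rw [hi', PySem.Int.mod_eq_emod_of_pos (by norm_num)]
    have emod2 : r = (l + sk) % 256 := by
      rw [hr, PySem.Int.mod_eq_emod_of_pos (by norm_num)]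
    have hoff : PySem.Int.mod (i + r) 256 = i' := by
      rw [PySem.Int.mod_eq_emod_of_pos (by norm_num)]; omega
    have hkey : (256 - i.toNat + i'.toNat) % 256 = r.toNat % 256 := by omega
    have hrot3 : nl2.rotate r.toNat = (nl2.rotate (256 - i.toNat)).rotate i'.toNat := by
      rw [List.rotate_rotate, ← List.rotate_mod nl2 r.toNat,
        ← List.rotate_mod nl2 (256 - i.toNat + i'.toNat), hlen2, hkey]
    simp only [stepB, Option.bind_some, hparse, Option.map_some, hswap, ← hr, hs1, hs2]
    rw [hrot2, hrot3, hoff]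

lemma fold_rel (ts : List String) (nl : List Int) (i sk : Int)
    (hlen : nl.length = 256) (hi0 : 0 ≤ i) (hi : i < 256)
    (hpre : ∀ t ∈ ts, ((PySem.Int.ofStr? t).map (fun v => decide (v ≤ 256))).getD false = true) :
    ∃ nl' i' sk',
      ts.foldl stepA (some (nl, i, sk)) = some (nl', i', sk') ∧
      ts.foldl stepB (some (nl.rotate i.toNat, i, sk)) = some (nl'.rotate i'.toNat, i', sk') ∧
      nl'.length = 256 ∧ 0 ≤ i' ∧ i' < 256 := by
  induction ts generalizing nl i sk with
  | nil => exact ⟨nl, i, sk, rfl, rfl, hlen, hi0, hi⟩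
  | cons t ts ih =>
    have hpt := hpre t (by simp)
    obtain ⟨l, hparse, hl⟩ : ∃ l, PySem.Int.ofStr? t = some l ∧ l ≤ 256 := by
      cases h : PySem.Int.ofStr? t with
      | none => rw [h] at hpt; simp at hpt
      | some v => rw [h] at hpt; simp at hpt; exact ⟨v, rfl, hpt⟩
    obtain ⟨nl', i', hA, hB, hlen', hi0', hi'⟩ := step_eq t nl i sk l hlen hi0 hi hparse hl
    obtain ⟨nl'', i'', sk'', hA2, hB2, h3, h4, h5⟩ :=
      ih nl' i' (sk + 1) hlen' hi0' hi' (fun t ht => hpre t (by simp [ht]))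
    exact ⟨nl'', i'', sk'', by rw [List.foldl_cons, hA, hA2],
      by rw [List.foldl_cons, hB, hB2], h3, h4, h5⟩

-- ===== VERDICT (by name: the statement is the Claim_ definition above) =====
theorem solve_spec : Claim_equal_solve := by
  intro input _ hpre
  unfold Spec_solve
  have hlen0 : (PySem.List.pyRange 0 256 1 : List Int).length = 256 := by
    rw [PySem.List.length_pyRange_one]; decide
  obtain ⟨nl', i', sk', hA, hB, hlen', hi0', hi'⟩ :=
    fold_rel ((PySem.Str.split? input ",").getD []) (PySem.List.pyRange 0 256 1) 0 0
      hlen0 le_rfl (by norm_num) hpre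
  rw [show ((0:Int).toNat) = 0 from rfl, List.rotate_zero] at hB
  simp only [solve, solve_alt, hA, hB]
  have e0 : PySem.Int.mod (0 - i') 256 = (0 - i') % 256 := PySem.Int.mod_eq_emod_of_pos (by norm_num)
  have e1 : PySem.Int.mod (1 - i') 256 = (1 - i') % 256 := PySem.Int.mod_eq_emod_of_pos (by norm_num)
  have hb0 : 0 ≤ PySem.Int.mod (0 - i') 256 ∧ PySem.Int.mod (0 - i') 256 < 256 :=
    ⟨PySem.Int.mod_nonneg _ (by norm_num), PySem.Int.mod_lt _ (by norm_num)⟩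
  have hb1 : 0 ≤ PySem.Int.mod (1 - i') 256 ∧ PySem.Int.mod (1 - i') 256 < 256 :=
    ⟨PySem.Int.mod_nonneg _ (by norm_num), PySem.Int.mod_lt _ (by norm_num)⟩
  have hlr : (nl'.rotate i'.toNat).length = 256 := by simp [hlen']
  have hg0 : PySem.List.pyGet? (nl'.rotate i'.toNat) (PySem.Int.mod (0 - i') 256) = nl'[0]? := by
    rw [PySem.List.pyGet?_of_nonneg _ hb0.1,
      List.getElem?_rotate (by rw [hlen']; omega), hlen']
    congr 1
    omega
  have hg1 : PySem.List.pyGet? (nl'.rotate i'.toNat) (PySem.Int.mod (1 - i') 256) = nl'[1]? := by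
    rw [PySem.List.pyGet?_of_nonneg _ hb1.1,
      List.getElem?_rotate (by rw [hlen']; omega), hlen']
    congr 1
    omega
  rw [hg0, hg1, PySem.List.pyGet?_zero, PySem.List.pyGet?_of_nonneg _ (by norm_num : (0:Int) ≤ 1)]
  rfl
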